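-- pv_equiv track=rewrite | github.com/LordBalouch/norway-housing-pressure-pipeline | src/01_download_raw.py | pick_region_subset
-- ===== SOURCE A (Python) =====
-- from typing import Any, Dict, List, Optional, Tuple
--
-- def pick_region_subset(codes: List[str], labels: Dict[str, str], max_n: int) -> List[str]:
--     preferred_terms = ["norway", "whole country", "oslo", "bergen", "trondheim", "stavanger", "tromsø"]
--     preferred: List[str] = []
--     for term in preferred_terms:
--         for c in codes:
--             if term in labels.get(c, "").lower() and c not in preferred:
--                 preferred.append(c)
--     remaining = [c for c in codes if c not in preferred]
--     return (preferred + remaining)[:max_n]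
-- ===== SOURCE B (Python) =====
-- def pick_region_subset(codes, labels, max_n):
--     terms = ["norway", "whole country", "oslo", "bergen", "trondheim", "stavanger", "tromsø"]
--     T = len(terms)
--     buckets = [[] for _ in range(T)]
--     remaining = []
--     for c in codes:
--         lab = labels.get(c, "").lower()
--         r = T
--         for i, t in enumerate(terms):
--             if t in lab:
--                 r = i
--                 break
--         if r == T:
--             remaining.append(c)
--         elif c not in buckets[r]:
--             buckets[r].append(c)
--     preferred = [c for b in buckets for c in b]
--     return (preferred + remaining)[:max_n]
-- ===== Notes on version B (the rewrite author's own statement) =====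
-- stated objective: faster
-- what changed: Instead of A's seven per-term rescans of all codes (each lowering every label again and re-checking membership in the growing preferred list), B makes one pass over codes, computing each code's first-matching-term rank once (one lookup and one lower per code), dropping deduped matches into seven rank buckets and unmatched codes into remaining in the same loop, then concatenates buckets and remaining.
import Mathlib
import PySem

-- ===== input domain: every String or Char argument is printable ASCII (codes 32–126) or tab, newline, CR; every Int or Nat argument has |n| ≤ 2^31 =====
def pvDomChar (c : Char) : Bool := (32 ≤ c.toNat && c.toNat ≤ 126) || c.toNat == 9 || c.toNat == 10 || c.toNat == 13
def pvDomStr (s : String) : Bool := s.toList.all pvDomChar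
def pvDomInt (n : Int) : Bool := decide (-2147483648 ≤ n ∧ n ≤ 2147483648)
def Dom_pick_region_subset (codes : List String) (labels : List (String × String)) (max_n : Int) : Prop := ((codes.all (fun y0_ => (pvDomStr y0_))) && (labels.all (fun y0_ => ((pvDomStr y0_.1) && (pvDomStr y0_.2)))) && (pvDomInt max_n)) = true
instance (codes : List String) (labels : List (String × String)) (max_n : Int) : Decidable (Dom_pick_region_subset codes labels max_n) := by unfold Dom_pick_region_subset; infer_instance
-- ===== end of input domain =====

-- B replaces A's seven per-term rescans of all codes by a one-pass bucketing of codes by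
-- first-matching-term rank (objective: a constant-factor speedup — one label lowering and
-- one pass over codes instead of one per term).


-- ===== PORT A =====
-- 'term in labels.get(c, "").lower()' is PySem.Str.isIn over the PySem.Dict lookup
def pick_region_subset (codes : List String) (labels : List (String × String)) (max_n : Int) : List String :=
  let preferred_terms : List String := ["norway", "whole country", "oslo", "bergen", "trondheim", "stavanger", "tromsø"]
  let preferred : List String :=
    preferred_terms.foldl (fun pref term =>
      codes.foldl (fun pref c =>
        if PySem.Str.isIn term (PySem.Str.lower ((PySem.Dict.mk labels).getD c "")) && !decide (c ∈ pref)
        then pref ++ [c] else pref) pref) []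
  let remaining : List String := codes.filter (fun c => !decide (c ∈ preferred))
  PySem.List.slice (preferred ++ remaining) none (some max_n)

-- ===== PORT B =====
def pvTermsB : List String := ["norway", "whole country", "oslo", "bergen", "trondheim", "stavanger", "tromsø"]

-- helper `rank`: index of the first preferred term contained in the lowered label, else len(terms)
def pvRankAux (lab : String) : List String → Nat
  | [] => 0
  | t :: ts => if PySem.Str.isIn t lab then 0 else 1 + pvRankAux lab ts

def pvRank (labels : List (String × String)) (c : String) : Nat :=
  pvRankAux (PySem.Str.lower ((PySem.Dict.mk labels).getD c "")) pvTermsB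

-- loop body: unmatched codes go to remaining; matched ones into bucket rank(c) unless already there
def pvStepB (labels : List (String × String)) (st : List (List String) × List String) (c : String) :
    List (List String) × List String :=
  let r := pvRank labels c
  if r = pvTermsB.length then (st.1, st.2 ++ [c])
  else if decide (c ∈ st.1.getD r []) then st
  else (st.1.modify r (· ++ [c]), st.2)

def pick_region_subset_alt (codes : List String) (labels : List (String × String)) (max_n : Int) : List String :=
  let st := codes.foldl (pvStepB labels) (List.replicate pvTermsB.length [], [])
  let preferred := st.1.flatten
  let remaining := st.2
  PySem.List.slice (preferred ++ remaining) none (some max_n)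

-- ===== PRECONDITION & SPEC =====
def Spec_pick_region_subset (codes : List String) (labels : List (String × String)) (max_n : Int) (out : List String) : Prop := out = pick_region_subset_alt codes labels max_n
instance (codes : List String) (labels : List (String × String)) (max_n : Int) (out : List String) : Decidable (Spec_pick_region_subset codes labels max_n out) := by unfold Spec_pick_region_subset; infer_instance

-- ===== CLAIM (what is proved, stated in full; the proofs are below) =====
def Claim_equal_pick_region_subset : Prop := ∀ (codes : List String) (labels : List (String × String)) (max_n : Int), Dom_pick_region_subset codes labels max_n → Spec_pick_region_subset codes labels max_n (pick_region_subset codes labels max_n)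

-- ===== LEMMAS AND PROOFS =====

-- filter-with-first-occurrence-dedup, the common shape of both programs' selections
def pvSelg (p seen : String → Bool) : List String → List String
  | [] => []
  | c :: cs => if p c && !seen c then c :: pvSelg p (fun x => seen x || decide (x = c)) cs
               else pvSelg p seen cs

-- canonical rank-k block and their concatenation
def pvBlk (codes : List String) (labels : List (String × String)) (k : Nat) : List String :=
  pvSelg (fun c => decide (pvRank labels c = k)) (fun _ => false) codes

def pvBlkCat (codes : List String) (labels : List (String × String)) : Nat → List String → List String
  | _, [] => []
  | k, _ :: ts => pvBlk codes labels k ++ pvBlkCat codes labels (k + 1) ts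

lemma pvSelg_congr : ∀ (cs : List String) (p p' s s' : String → Bool), (∀ c ∈ cs, (p c && !s c) = (p' c && !s' c)) →
    pvSelg p s cs = pvSelg p' s' cs := by
  intro cs
  induction cs with
  | nil => intro _ _ _ _ _; rfl
  | cons c cs ih =>
    intro p p' s s' h
    have hc := h c (by simp)
    have hrest : ∀ x ∈ cs, (p x && !s x) = (p' x && !s' x) :=
      fun x hx => h x (List.mem_cons_of_mem _ hx)
    by_cases hg : (p c && !s c) = true
    · have hg' : (p' c && !s' c) = true := hc ▸ hg
      simp only [pvSelg, hg, hg', if_true]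
      have := ih (p := p) (p' := p') (s := fun x => s x || decide (x = c))
        (s' := fun x => s' x || decide (x = c)) (by
          intro x hx
          have hx' := hrest x hx
          cases hxc : decide (x = c) <;>
            cases hp : p x <;> cases hs : s x <;> cases hp' : p' x <;> cases hs' : s' x <;>
            simp_all)
      rw [this]
    · have hg' : ¬ (p' c && !s' c) = true := hc ▸ hg
      simp only [pvSelg, if_neg hg, if_neg hg']
      exact ih _ _ _ _ hrest

lemma mem_pvSelg : ∀ (cs : List String) (p s : String → Bool) (x : String),
      x ∈ pvSelg p s cs ↔ x ∈ cs ∧ p x = true ∧ s x = false := by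
  intro cs
  induction cs with
  | nil => simp [pvSelg]
  | cons c cs ih =>
    intro p s x
    by_cases hg : (p c && !s c) = true
    · simp only [pvSelg, hg, if_true, List.mem_cons, ih]
      simp only [Bool.and_eq_true, Bool.not_eq_true', Bool.or_eq_false_iff, decide_eq_false_iff_not] at *
      constructor
      · rintro (rfl | ⟨h1, h2, h3, h4⟩)
        · exact ⟨Or.inl rfl, hg⟩
        · exact ⟨Or.inr h1, h2, h3⟩
      · rintro ⟨(rfl | h1), h2, h3⟩
        · exact Or.inl rfl
        · by_cases hxc : x = c
          · exact Or.inl hxc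
          · exact Or.inr ⟨h1, h2, h3, hxc⟩
    · simp only [pvSelg, if_neg hg, ih, List.mem_cons]
      simp only [Bool.and_eq_true, Bool.not_eq_true'] at hg
      constructor
      · tauto
      · rintro ⟨(rfl | h1), h2, h3⟩
        · exact absurd ⟨h2, h3⟩ hg
        · tauto

lemma pvFoldApp (p : String → Bool) :
    ∀ (cs P : List String),
      cs.foldl (fun acc c => if p c && !decide (c ∈ acc) then acc ++ [c] else acc) P
        = P ++ pvSelg p (fun x => decide (x ∈ P)) cs := by
  intro cs
  induction cs with
  | nil => simp [pvSelg]
  | cons c cs ih =>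
    intro P
    simp only [List.foldl_cons, pvSelg]
    by_cases hg : (p c && !decide (c ∈ P)) = true
    · rw [if_pos hg, if_pos hg, ih]
      have : (fun x => decide (x ∈ P ++ [c])) = (fun x => decide (x ∈ P) || decide (x = c)) := by
        funext x; simp [List.mem_append]
      rw [this, List.append_assoc]
      rfl
    · rw [if_neg hg, if_neg hg, ih]

lemma pvRankAux_le (lab : String) : ∀ ts : List String, pvRankAux lab ts ≤ ts.length := by
  intro ts
  induction ts with
  | nil => simp [pvRankAux]
  | cons t ts ih =>
    simp only [pvRankAux, List.length_cons]
    split <;> omega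

lemma pvRankAux_eq_iff (lab : String) :
    ∀ (ts : List String) (k : Nat) (t : String), ts[k]? = some t →
      ¬ pvRankAux lab ts < k →
      (PySem.Str.isIn t lab = true ↔ pvRankAux lab ts = k) := by
  intro ts
  induction ts with
  | nil => intro k t h; simp at h
  | cons t0 ts ih =>
    intro k t hk hlt
    cases k with
    | zero =>
      simp only [List.getElem?_cons_zero, Option.some.injEq] at hk
      subst hk
      by_cases hin : PySem.Str.isIn t0 lab = true
      · rw [pvRankAux, if_pos hin]; simpa using hin
      · rw [pvRankAux, if_neg hin]; simpa using hin
    | succ k =>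
      have hni : ¬ PySem.Str.isIn t0 lab = true := by
        intro hin
        rw [pvRankAux, if_pos hin] at hlt
        omega
      simp only [List.getElem?_cons_succ] at hk
      rw [pvRankAux, if_neg hni] at hlt ⊢
      rw [ih k t hk (by omega)]
      omega

lemma mem_pvBlk (codes : List String) (labels : List (String × String)) (k : Nat) (x : String) :
    x ∈ pvBlk codes labels k ↔ x ∈ codes ∧ pvRank labels x = k := by
  rw [pvBlk, mem_pvSelg]
  simp

lemma pvOuterA (codes : List String) (labels : List (String × String)) :
    ∀ (ts : List String) (k : Nat) (P : List String),
      pvTermsB.drop k = ts →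
      (∀ x, x ∈ P ↔ x ∈ codes ∧ pvRank labels x < k) →
      ts.foldl (fun pref term =>
        codes.foldl (fun pref c =>
          if PySem.Str.isIn term (PySem.Str.lower ((PySem.Dict.mk labels).getD c "")) && !decide (c ∈ pref)
          then pref ++ [c] else pref) pref) P
      = P ++ pvBlkCat codes labels k ts := by
  intro ts
  induction ts with
  | nil => intro k P _ _; simp [pvBlkCat]
  | cons t ts ih =>
    intro k P hdrop hP
    have hk : pvTermsB[k]? = some t := by
      have h0 : (pvTermsB.drop k)[0]? = some t := by rw [hdrop]; rfl
      rwa [List.getElem?_drop, Nat.add_zero] at h0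
    have hdrop' : pvTermsB.drop (k + 1) = ts := by
      have : pvTermsB.drop (k + 1) = (pvTermsB.drop k).drop 1 := by
        rw [List.drop_drop, Nat.add_comm]
      rw [this, hdrop, List.drop_one, List.tail_cons]
    simp only [List.foldl_cons]
    rw [pvFoldApp (fun c => PySem.Str.isIn t (PySem.Str.lower ((PySem.Dict.mk labels).getD c ""))) codes P]
    have hblk : pvSelg (fun c => PySem.Str.isIn t (PySem.Str.lower ((PySem.Dict.mk labels).getD c "")))
        (fun x => decide (x ∈ P)) codes = pvBlk codes labels k := by
      apply pvSelg_congr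
      intro c hc
      have hmem : decide (c ∈ P) = decide (pvRank labels c < k) := by
        by_cases h : c ∈ P
        · have := (hP c).mp h; simp [h, this.2]
        · have : ¬ pvRank labels c < k := fun hlt => h ((hP c).mpr ⟨hc, hlt⟩)
          simp [h, this]
      rw [hmem]
      by_cases hlt : pvRank labels c < k
      · have hne : pvRank labels c ≠ k := by omega
        simp [hlt, hne]
      · have := pvRankAux_eq_iff (PySem.Str.lower ((PySem.Dict.mk labels).getD c "")) pvTermsB k t hk hlt
        simp only [pvRank] at *
        cases hin : PySem.Str.isIn t (PySem.Str.lower ((PySem.Dict.mk labels).getD c "")) with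
        | true => simp [this.mp hin]
        | false =>
          have hnr : pvRankAux (PySem.Str.lower ((PySem.Dict.mk labels).getD c "")) pvTermsB ≠ k :=
            fun he => by rw [this.mpr he] at hin; exact Bool.noConfusion hin
          simp [hnr, hlt]
    rw [hblk]
    rw [ih (k + 1) (P ++ pvBlk codes labels k) hdrop' (by
      intro x
      simp only [List.mem_append, hP, mem_pvBlk]
      constructor
      · rintro (⟨h1, h2⟩ | ⟨h1, h2⟩)
        · exact ⟨h1, by omega⟩
        · exact ⟨h1, by omega⟩
      · rintro ⟨h1, h2⟩
        by_cases he : pvRank labels x = k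
        · exact Or.inr ⟨h1, he⟩
        · exact Or.inl ⟨h1, by omega⟩)]
    rw [pvBlkCat, List.append_assoc]

lemma pvFoldB (labels : List (String × String)) :
    ∀ (cs : List String) (b0 b1 b2 b3 b4 b5 b6 rem : List String),
      cs.foldl (pvStepB labels) ([b0, b1, b2, b3, b4, b5, b6], rem) =
        ([ b0 ++ pvSelg (fun c => decide (pvRank labels c = 0)) (fun x => decide (x ∈ b0)) cs,
           b1 ++ pvSelg (fun c => decide (pvRank labels c = 1)) (fun x => decide (x ∈ b1)) cs,
           b2 ++ pvSelg (fun c => decide (pvRank labels c = 2)) (fun x => decide (x ∈ b2)) cs,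
           b3 ++ pvSelg (fun c => decide (pvRank labels c = 3)) (fun x => decide (x ∈ b3)) cs,
           b4 ++ pvSelg (fun c => decide (pvRank labels c = 4)) (fun x => decide (x ∈ b4)) cs,
           b5 ++ pvSelg (fun c => decide (pvRank labels c = 5)) (fun x => decide (x ∈ b5)) cs,
           b6 ++ pvSelg (fun c => decide (pvRank labels c = 6)) (fun x => decide (x ∈ b6)) cs ],
         rem ++ cs.filter (fun c => decide (pvRank labels c = 7))) := by
  intro cs
  induction cs with
  | nil => intro b0 b1 b2 b3 b4 b5 b6 rem; simp [pvSelg]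
  | cons c cs ih =>
    intro b0 b1 b2 b3 b4 b5 b6 rem
    have hle : pvRank labels c ≤ 7 := by
      have := pvRankAux_le (PySem.Str.lower ((PySem.Dict.mk labels).getD c "")) pvTermsB
      simpa [pvTermsB] using this
    simp only [List.foldl_cons]
    have hsel : ∀ (k : Nat) (b : List String), pvRank labels c ≠ k →
        pvSelg (fun x => decide (pvRank labels x = k)) (fun x => decide (x ∈ b)) (c :: cs)
          = pvSelg (fun x => decide (pvRank labels x = k)) (fun x => decide (x ∈ b)) cs := by
      intro k b hne
      rw [pvSelg]
      simp [hne]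
    have hselE : ∀ (k : Nat) (b : List String), pvRank labels c = k → c ∉ b →
        b ++ pvSelg (fun x => decide (pvRank labels x = k)) (fun x => decide (x ∈ b)) (c :: cs)
          = (b ++ [c]) ++ pvSelg (fun x => decide (pvRank labels x = k)) (fun x => decide (x ∈ b ++ [c])) cs := by
      intro k b he hnm
      rw [pvSelg]
      simp only [he, decide_true, hnm, decide_false, Bool.not_false, Bool.and_true, if_true]
      have hfe : (fun x => decide (x ∈ b) || decide (x = c)) = (fun x => decide (x ∈ b ++ [c])) := by
        funext x; simp [List.mem_append]
      rw [hfe, List.append_assoc]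
      rfl
    have hselM : ∀ (k : Nat) (b : List String), pvRank labels c = k → c ∈ b →
        pvSelg (fun x => decide (pvRank labels x = k)) (fun x => decide (x ∈ b)) (c :: cs)
          = pvSelg (fun x => decide (pvRank labels x = k)) (fun x => decide (x ∈ b)) cs := by
      intro k b he hm
      rw [pvSelg]
      simp [hm]
    have hr : pvRank labels c = 0 ∨ pvRank labels c = 1 ∨ pvRank labels c = 2 ∨ pvRank labels c = 3 ∨
        pvRank labels c = 4 ∨ pvRank labels c = 5 ∨ pvRank labels c = 6 ∨ pvRank labels c = 7 := by omega
    rcases hr with he | he | he | he | he | he | he | he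
    · rw [List.filter_cons_of_neg (by simp [he])]
      by_cases hm : c ∈ b0
      · have hstep : pvStepB labels ([b0, b1, b2, b3, b4, b5, b6], rem) c = ([b0, b1, b2, b3, b4, b5, b6], rem) := by
          rw [pvStepB]; simp [he, hm, List.getD, pvTermsB]
        rw [hstep, ih, hselM 0 b0 he hm]
        rw [hsel 1 b1 (by omega)]
        rw [hsel 2 b2 (by omega)]
        rw [hsel 3 b3 (by omega)]
        rw [hsel 4 b4 (by omega)]
        rw [hsel 5 b5 (by omega)]
        rw [hsel 6 b6 (by omega)]
      · have hstep : pvStepB labels ([b0, b1, b2, b3, b4, b5, b6], rem) c = ([b0 ++ [c], b1, b2, b3, b4, b5, b6], rem) := by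
          rw [pvStepB]; simp [he, hm, List.getD, List.modify, pvTermsB]
        rw [hstep, ih, ← hselE 0 b0 he hm]
        rw [hsel 1 b1 (by omega)]
        rw [hsel 2 b2 (by omega)]
        rw [hsel 3 b3 (by omega)]
        rw [hsel 4 b4 (by omega)]
        rw [hsel 5 b5 (by omega)]
        rw [hsel 6 b6 (by omega)]
    · rw [List.filter_cons_of_neg (by simp [he])]
      by_cases hm : c ∈ b1
      · have hstep : pvStepB labels ([b0, b1, b2, b3, b4, b5, b6], rem) c = ([b0, b1, b2, b3, b4, b5, b6], rem) := by
          rw [pvStepB]; simp [he, hm, List.getD, pvTermsB]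
        rw [hstep, ih, hselM 1 b1 he hm]
        rw [hsel 0 b0 (by omega)]
        rw [hsel 2 b2 (by omega)]
        rw [hsel 3 b3 (by omega)]
        rw [hsel 4 b4 (by omega)]
        rw [hsel 5 b5 (by omega)]
        rw [hsel 6 b6 (by omega)]
      · have hstep : pvStepB labels ([b0, b1, b2, b3, b4, b5, b6], rem) c = ([b0, b1 ++ [c], b2, b3, b4, b5, b6], rem) := by
          rw [pvStepB]; simp [he, hm, List.getD, List.modify, pvTermsB]
        rw [hstep, ih, ← hselE 1 b1 he hm]
        rw [hsel 0 b0 (by omega)]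
        rw [hsel 2 b2 (by omega)]
        rw [hsel 3 b3 (by omega)]
        rw [hsel 4 b4 (by omega)]
        rw [hsel 5 b5 (by omega)]
        rw [hsel 6 b6 (by omega)]
    · rw [List.filter_cons_of_neg (by simp [he])]
      by_cases hm : c ∈ b2
      · have hstep : pvStepB labels ([b0, b1, b2, b3, b4, b5, b6], rem) c = ([b0, b1, b2, b3, b4, b5, b6], rem) := by
          rw [pvStepB]; simp [he, hm, List.getD, pvTermsB]
        rw [hstep, ih, hselM 2 b2 he hm]
        rw [hsel 0 b0 (by omega)]
        rw [hsel 1 b1 (by omega)]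
        rw [hsel 3 b3 (by omega)]
        rw [hsel 4 b4 (by omega)]
        rw [hsel 5 b5 (by omega)]
        rw [hsel 6 b6 (by omega)]
      · have hstep : pvStepB labels ([b0, b1, b2, b3, b4, b5, b6], rem) c = ([b0, b1, b2 ++ [c], b3, b4, b5, b6], rem) := by
          rw [pvStepB]; simp [he, hm, List.getD, List.modify, pvTermsB]
        rw [hstep, ih, ← hselE 2 b2 he hm]
        rw [hsel 0 b0 (by omega)]
        rw [hsel 1 b1 (by omega)]
        rw [hsel 3 b3 (by omega)]
        rw [hsel 4 b4 (by omega)]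
        rw [hsel 5 b5 (by omega)]
        rw [hsel 6 b6 (by omega)]
    · rw [List.filter_cons_of_neg (by simp [he])]
      by_cases hm : c ∈ b3
      · have hstep : pvStepB labels ([b0, b1, b2, b3, b4, b5, b6], rem) c = ([b0, b1, b2, b3, b4, b5, b6], rem) := by
          rw [pvStepB]; simp [he, hm, List.getD, pvTermsB]
        rw [hstep, ih, hselM 3 b3 he hm]
        rw [hsel 0 b0 (by omega)]
        rw [hsel 1 b1 (by omega)]
        rw [hsel 2 b2 (by omega)]
        rw [hsel 4 b4 (by omega)]
        rw [hsel 5 b5 (by omega)]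
        rw [hsel 6 b6 (by omega)]
      · have hstep : pvStepB labels ([b0, b1, b2, b3, b4, b5, b6], rem) c = ([b0, b1, b2, b3 ++ [c], b4, b5, b6], rem) := by
          rw [pvStepB]; simp [he, hm, List.getD, List.modify, pvTermsB]
        rw [hstep, ih, ← hselE 3 b3 he hm]
        rw [hsel 0 b0 (by omega)]
        rw [hsel 1 b1 (by omega)]
        rw [hsel 2 b2 (by omega)]
        rw [hsel 4 b4 (by omega)]
        rw [hsel 5 b5 (by omega)]
        rw [hsel 6 b6 (by omega)]
    · rw [List.filter_cons_of_neg (by simp [he])]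
      by_cases hm : c ∈ b4
      · have hstep : pvStepB labels ([b0, b1, b2, b3, b4, b5, b6], rem) c = ([b0, b1, b2, b3, b4, b5, b6], rem) := by
          rw [pvStepB]; simp [he, hm, List.getD, pvTermsB]
        rw [hstep, ih, hselM 4 b4 he hm]
        rw [hsel 0 b0 (by omega)]
        rw [hsel 1 b1 (by omega)]
        rw [hsel 2 b2 (by omega)]
        rw [hsel 3 b3 (by omega)]
        rw [hsel 5 b5 (by omega)]
        rw [hsel 6 b6 (by omega)]
      · have hstep : pvStepB labels ([b0, b1, b2, b3, b4, b5, b6], rem) c = ([b0, b1, b2, b3, b4 ++ [c], b5, b6], rem) := by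
          rw [pvStepB]; simp [he, hm, List.getD, List.modify, pvTermsB]
        rw [hstep, ih, ← hselE 4 b4 he hm]
        rw [hsel 0 b0 (by omega)]
        rw [hsel 1 b1 (by omega)]
        rw [hsel 2 b2 (by omega)]
        rw [hsel 3 b3 (by omega)]
        rw [hsel 5 b5 (by omega)]
        rw [hsel 6 b6 (by omega)]
    · rw [List.filter_cons_of_neg (by simp [he])]
      by_cases hm : c ∈ b5
      · have hstep : pvStepB labels ([b0, b1, b2, b3, b4, b5, b6], rem) c = ([b0, b1, b2, b3, b4, b5, b6], rem) := by
          rw [pvStepB]; simp [he, hm, List.getD, pvTermsB]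
        rw [hstep, ih, hselM 5 b5 he hm]
        rw [hsel 0 b0 (by omega)]
        rw [hsel 1 b1 (by omega)]
        rw [hsel 2 b2 (by omega)]
        rw [hsel 3 b3 (by omega)]
        rw [hsel 4 b4 (by omega)]
        rw [hsel 6 b6 (by omega)]
      · have hstep : pvStepB labels ([b0, b1, b2, b3, b4, b5, b6], rem) c = ([b0, b1, b2, b3, b4, b5 ++ [c], b6], rem) := by
          rw [pvStepB]; simp [he, hm, List.getD, List.modify, pvTermsB]
        rw [hstep, ih, ← hselE 5 b5 he hm]
        rw [hsel 0 b0 (by omega)]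
        rw [hsel 1 b1 (by omega)]
        rw [hsel 2 b2 (by omega)]
        rw [hsel 3 b3 (by omega)]
        rw [hsel 4 b4 (by omega)]
        rw [hsel 6 b6 (by omega)]
    · rw [List.filter_cons_of_neg (by simp [he])]
      by_cases hm : c ∈ b6
      · have hstep : pvStepB labels ([b0, b1, b2, b3, b4, b5, b6], rem) c = ([b0, b1, b2, b3, b4, b5, b6], rem) := by
          rw [pvStepB]; simp [he, hm, List.getD, pvTermsB]
        rw [hstep, ih, hselM 6 b6 he hm]
        rw [hsel 0 b0 (by omega)]
        rw [hsel 1 b1 (by omega)]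
        rw [hsel 2 b2 (by omega)]
        rw [hsel 3 b3 (by omega)]
        rw [hsel 4 b4 (by omega)]
        rw [hsel 5 b5 (by omega)]
      · have hstep : pvStepB labels ([b0, b1, b2, b3, b4, b5, b6], rem) c = ([b0, b1, b2, b3, b4, b5, b6 ++ [c]], rem) := by
          rw [pvStepB]; simp [he, hm, List.getD, List.modify, pvTermsB]
        rw [hstep, ih, ← hselE 6 b6 he hm]
        rw [hsel 0 b0 (by omega)]
        rw [hsel 1 b1 (by omega)]
        rw [hsel 2 b2 (by omega)]
        rw [hsel 3 b3 (by omega)]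
        rw [hsel 4 b4 (by omega)]
        rw [hsel 5 b5 (by omega)]
    · rw [List.filter_cons_of_pos (by simp [he])]
      have hstep : pvStepB labels ([b0, b1, b2, b3, b4, b5, b6], rem) c = ([b0, b1, b2, b3, b4, b5, b6], rem ++ [c]) := by
        rw [pvStepB]; simp [he, pvTermsB]
      rw [hstep, ih]
      rw [hsel 0 b0 (by omega)]
      rw [hsel 1 b1 (by omega)]
      rw [hsel 2 b2 (by omega)]
      rw [hsel 3 b3 (by omega)]
      rw [hsel 4 b4 (by omega)]
      rw [hsel 5 b5 (by omega)]
      rw [hsel 6 b6 (by omega)]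
      rw [List.append_assoc, List.singleton_append]


-- ===== VERDICT (by name: the statement is the Claim_ definition above) =====
theorem pick_region_subset_spec : Claim_equal_pick_region_subset := by
  intro codes labels max_n _
  unfold Spec_pick_region_subset
  simp only [pick_region_subset, pick_region_subset_alt]
  have hlit : (["norway", "whole country", "oslo", "bergen", "trondheim", "stavanger", "tromsø"] : List String) = pvTermsB := rfl
  rw [hlit]
  have hA := pvOuterA codes labels pvTermsB 0 [] rfl (by simp)
  rw [hA, List.nil_append]
  rw [show (List.replicate pvTermsB.length ([] : List String), ([] : List String))
        = (([[], [], [], [], [], [], []] : List (List String)), ([] : List String)) from rfl]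
  rw [pvFoldB labels codes [] [] [] [] [] [] [] []]
  have hempty : (fun x => decide (x ∈ ([] : List String))) = (fun _ => false) := by
    funext x; simp
  simp only [hempty, List.nil_append]
  have hflat : ([pvSelg (fun c => decide (pvRank labels c = 0)) (fun _ => false) codes,
      pvSelg (fun c => decide (pvRank labels c = 1)) (fun _ => false) codes,
      pvSelg (fun c => decide (pvRank labels c = 2)) (fun _ => false) codes,
      pvSelg (fun c => decide (pvRank labels c = 3)) (fun _ => false) codes,
      pvSelg (fun c => decide (pvRank labels c = 4)) (fun _ => false) codes,
      pvSelg (fun c => decide (pvRank labels c = 5)) (fun _ => false) codes,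
      pvSelg (fun c => decide (pvRank labels c = 6)) (fun _ => false) codes] : List (List String)).flatten
      = pvBlkCat codes labels 0 pvTermsB := by
    simp [pvBlkCat, pvTermsB, pvBlk]
  simp only [List.flatten_cons, List.flatten_nil, List.append_nil] at hflat ⊢
  rw [hflat]
  have hrem : codes.filter (fun c => !decide (c ∈ pvBlkCat codes labels 0 pvTermsB))
      = codes.filter (fun c => decide (pvRank labels c = 7)) := by
    apply List.filter_congr
    intro c hc
    have hmem : c ∈ pvBlkCat codes labels 0 pvTermsB ↔ pvRank labels c < 7 := by
      simp [pvBlkCat, pvTermsB, mem_pvBlk, hc]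
      omega
    have hle : pvRank labels c ≤ 7 := by
      have := pvRankAux_le (PySem.Str.lower ((PySem.Dict.mk labels).getD c "")) pvTermsB
      simpa [pvRank, pvTermsB] using this
    by_cases h : c ∈ pvBlkCat codes labels 0 pvTermsB
    · have h7 : pvRank labels c ≠ 7 := by have := hmem.mp h; omega
      simp [h, h7]
    · have h7 : pvRank labels c = 7 := by
        have hge : ¬ pvRank labels c < 7 := fun hlt => h (hmem.mpr hlt)
        omega
      simp [h, h7]
  rw [hrem]
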